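-- pv_equiv track=rewrite | github.com/NewaysNju/train | offer_train.py | GetTranslation_dp
-- ===== SOURCE A (Python) =====
-- def GetTranslation_dp(numbers):
--     str1 = str(numbers)
--     if str1 == None or str1 == "":  # 第一个惯例异常处理
--         return 0
--     cur = 1 if str1[-1] != '0' else 0  # 第二个异常之处
--     nex = 1
--     for i in range(len(str1) - 2, -1, -1):
--         tmp = cur
--         if int(str1[i:i + 2]) < 26:
--             cur += nex  # nex是前者，cur是现在，一旦发生可以两种翻译，即前面所有遍历的字母都可以用在两种不同字串中
--         nex = tmp
--     return cur
-- ===== SOURCE B (Python) =====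
-- def GetTranslation_dp(numbers):
--     # Forward scan: accumulate the product of 2x2 transfer matrices over adjacent
--     # digit pairs, then apply it to the base vector determined by the last digit.
--     s = str(numbers)
--     if s == "":
--         return 0
--     p11, p12, p21, p22 = 1, 0, 0, 1
--     for j in range(len(s) - 1):
--         c = 1 if int(s[j:j + 2]) < 26 else 0
--         p11, p12 = p11 + p12, p11 * c
--         p21, p22 = p21 + p22, p21 * c
--     b = 1 if s[-1] != '0' else 0
--     return p11 * b + p12
-- ===== Notes on version B (the rewrite author's own statement) =====
-- stated objective: alternative
-- what changed: Replaces A's backward two-variable recurrence (iterating from the last digit down) by a forward left-to-right scan that accumulates a 2x2 transfer-matrix product over adjacent digit pairs and applies it to the last-digit base vector at the end.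
import Mathlib
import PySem

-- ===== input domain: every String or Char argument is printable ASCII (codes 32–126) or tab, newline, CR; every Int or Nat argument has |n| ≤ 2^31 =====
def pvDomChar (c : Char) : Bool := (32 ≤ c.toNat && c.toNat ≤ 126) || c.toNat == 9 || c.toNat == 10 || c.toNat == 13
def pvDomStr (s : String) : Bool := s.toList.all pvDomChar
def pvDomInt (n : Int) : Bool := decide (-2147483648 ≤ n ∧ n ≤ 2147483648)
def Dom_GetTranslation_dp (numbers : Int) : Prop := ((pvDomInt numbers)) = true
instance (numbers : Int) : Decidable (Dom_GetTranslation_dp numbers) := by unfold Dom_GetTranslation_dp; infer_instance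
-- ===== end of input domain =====

-- B replaces A's backward two-variable recurrence by a forward left-to-right scan that
-- accumulates a 2x2 transfer-matrix product and applies it to A's base vector at the end
-- (objective: alternative — same O(n) cost, genuinely different decomposition).

-- ===== PORT A =====
-- literal transliteration of A; strings handled as List Char via PySem.Int.toChars
-- (the .getD 0 after ofChars? is unreachable: every length-2 slice of str(int) parses).
def GetTranslation_dp (numbers : Int) : Int :=
  let str1 := PySem.Int.toChars numbers
  if str1 = [] then 0
  else
    let cur : Int := if PySem.List.pyGet? str1 (-1) ≠ some '0' then 1 else 0
    let nex : Int := 1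
    let r := (PySem.List.pyRange ((str1.length : Int) - 2) (-1) (-1)).foldl
      (fun (st : Int × Int) (i : Int) =>
        let tmp := st.1
        let cur' := if (PySem.Int.ofChars? (PySem.List.slice str1 (some i) (some (i + 2)))).getD 0 < 26
                    then st.1 + st.2 else st.1
        (cur', tmp)) (cur, nex)
    r.1

-- ===== PORT B =====
def GetTranslation_dp_alt (numbers : Int) : Int :=
  let s := PySem.Int.toChars numbers
  if s = [] then 0
  else
    let p := (PySem.List.pyRange 0 ((s.length : Int) - 1) 1).foldl
      (fun (p : Int × Int × Int × Int) (j : Int) =>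
        let c : Int := if (PySem.Int.ofChars? (PySem.List.slice s (some j) (some (j + 2)))).getD 0 < 26
                       then 1 else 0
        (p.1 + p.2.1, p.1 * c, p.2.2.1 + p.2.2.2, p.2.2.1 * c)) (1, 0, 0, 1)
    let b : Int := if PySem.List.pyGet? s (-1) ≠ some '0' then 1 else 0
    p.1 * b + p.2.1

-- ===== PRECONDITION & SPEC =====
def Spec_GetTranslation_dp (numbers : Int) (out : Int) : Prop := out = GetTranslation_dp_alt numbers
instance (numbers : Int) (out : Int) : Decidable (Spec_GetTranslation_dp numbers out) := by unfold Spec_GetTranslation_dp; infer_instance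

-- ===== CLAIM (what is proved, stated in full; the proofs are below) =====
def Claim_equal_GetTranslation_dp : Prop := ∀ (numbers : Int), Dom_GetTranslation_dp numbers → Spec_GetTranslation_dp numbers (GetTranslation_dp numbers)

-- ===== LEMMAS AND PROOFS =====

-- Applying the left-to-right matrix product (B's fold) to a vector equals running the
-- backward scalar recurrence (A's fold, written as a foldr over the ascending index list).
theorem pv_fold_key (q : Int → Prop) [DecidablePred q] (R : List Int)
    (P : Int × Int × Int × Int) (v : Int × Int) :
    (let F := R.foldl (fun (p : Int × Int × Int × Int) (j : Int) =>
        let c : Int := if q j then 1 else 0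
        (p.1 + p.2.1, p.1 * c, p.2.2.1 + p.2.2.2, p.2.2.1 * c)) P
     (F.1 * v.1 + F.2.1 * v.2, F.2.2.1 * v.1 + F.2.2.2 * v.2))
    = (let w := R.foldr (fun (i : Int) (st : Int × Int) =>
        let tmp := st.1
        let cur' := if q i then st.1 + st.2 else st.1
        (cur', tmp)) v
       (P.1 * w.1 + P.2.1 * w.2, P.2.2.1 * w.1 + P.2.2.2 * w.2)) := by
  induction R generalizing P with
  | nil => simp
  | cons i R ih =>
    simp only [List.foldl_cons, List.foldr_cons]
    rw [ih]
    by_cases h : q i <;> simp only [h, if_pos, if_neg, not_false_iff] <;>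
      exact Prod.ext (by ring) (by ring)

-- ===== VERDICT (by name: the statement is the Claim_ definition above) =====
theorem GetTranslation_dp_spec : Claim_equal_GetTranslation_dp := by
  intro numbers _
  unfold Spec_GetTranslation_dp GetTranslation_dp GetTranslation_dp_alt
  set s := PySem.Int.toChars numbers with hs
  by_cases hnil : s = []
  · simp [hnil]
  · simp only [if_neg hnil]
    have hrange : PySem.List.pyRange ((s.length : Int) - 2) (-1) (-1)
        = (PySem.List.pyRange 0 ((s.length : Int) - 1) 1).reverse := by
      rw [PySem.List.pyRange_neg_one_eq_reverse]
      ring_nf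
    rw [hrange, List.foldl_reverse]
    have := pv_fold_key
      (fun i => (PySem.Int.ofChars? (PySem.List.slice s (some i) (some (i + 2)))).getD 0 < 26)
      (PySem.List.pyRange 0 ((s.length : Int) - 1) 1)
      (1, 0, 0, 1)
      ((if PySem.List.pyGet? s (-1) ≠ some '0' then 1 else 0), 1)
    simp only at this
    simp only [one_mul, zero_mul, mul_one, add_zero, zero_add] at this
    exact (congrArg Prod.fst this).symm
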